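-- pv_equiv track=rewrite | github.com/sweaty-fingers/Algorithm | etc_problems/ugly_number.py | dynamics
-- ===== SOURCE A (Python) =====
-- def dynamics(n):
--     indices = 1
--     num = 2
--     while True:
--         if num % 2 == 0 or num % 3 ==0 or num % 5 == 0:
--             indices += 1
--
--         if indices == n:
--             return num
--
--         num += 1
-- ===== SOURCE B (Python) =====
-- # O(1) closed form: multiples of 2/3/5 repeat with period 30 (22 per period).
-- _TABLE = [2, 3, 4, 5, 6, 8, 9, 10, 12, 14, 15, 16, 18, 20, 21, 22, 24, 25, 26, 27, 28, 30]
--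
-- def dynamics(n):
--     q, r = divmod(n - 2, 22)
--     return 30 * q + _TABLE[r]
-- ===== Notes on version B (the rewrite author's own statement) =====
-- stated objective: faster
-- what changed: A counts upward one integer at a time until it reaches the n-th hit; B exploits the period-30 pattern (22 multiples of 2/3/5 per period) and returns 30*((n-2)//22) + table[(n-2)%22] in O(1).
import Mathlib
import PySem

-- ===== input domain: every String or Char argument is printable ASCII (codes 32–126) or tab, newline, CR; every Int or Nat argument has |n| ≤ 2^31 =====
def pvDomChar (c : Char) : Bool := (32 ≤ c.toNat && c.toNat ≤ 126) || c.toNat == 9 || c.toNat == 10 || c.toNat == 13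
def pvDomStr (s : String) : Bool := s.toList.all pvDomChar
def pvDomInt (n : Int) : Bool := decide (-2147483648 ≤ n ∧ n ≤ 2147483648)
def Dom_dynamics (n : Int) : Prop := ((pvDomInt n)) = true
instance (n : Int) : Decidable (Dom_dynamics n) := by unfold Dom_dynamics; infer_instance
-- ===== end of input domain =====

-- B replaces A's one-by-one upward count with the O(1) period-30 closed form
-- 30*((n-2)//22) + table[(n-2)%22]; equivalence of the return values is proved for n ≥ 2.

-- ===== PORT A =====
-- 'while True' ported with a fuel parameter that only makes the recursion total;
-- the proof shows fuel (30*n).toNat is never exhausted when Pre_ holds.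
def dynLoop (n indices num : Int) : Nat → Int
  | 0 => 0
  | fuel + 1 =>
    let indices' := if num % 2 = 0 ∨ num % 3 = 0 ∨ num % 5 = 0 then indices + 1 else indices
    if indices' = n then num else dynLoop n indices' (num + 1) fuel

def dynamics (n : Int) : Int := dynLoop n 1 2 (30 * n).toNat

-- ===== PORT B =====
def pvTableB : List Int := [2, 3, 4, 5, 6, 8, 9, 10, 12, 14, 15, 16, 18, 20, 21, 22, 24, 25, 26, 27, 28, 30]

-- _TABLE[r]: r = (n-2) % 22 always lies in [0,22), so pyGet? is never none; .getD 0 is exact here.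
def dynamics_alt (n : Int) : Int :=
  let q := PySem.Int.floordiv (n - 2) 22
  let r := PySem.Int.mod (n - 2) 22
  30 * q + (PySem.List.pyGet? pvTableB r).getD 0

-- ===== PRECONDITION & SPEC =====
-- A's loop never returns for n ≤ 1 (indices jumps from 1 to 2 before the first check), so A diverges there.
def Pre_dynamics (n : Int) : Prop := 2 ≤ n
instance (n : Int) : Decidable (Pre_dynamics n) := by unfold Pre_dynamics; infer_instance
def pvWitness_dynamics : Int := 2

def Spec_dynamics (n : Int) (out : Int) : Prop := out = dynamics_alt n
instance (n : Int) (out : Int) : Decidable (Spec_dynamics n out) := by unfold Spec_dynamics; infer_instance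

-- ===== CLAIM (what is proved, stated in full; the proofs are below) =====
def Claim_equal_dynamics : Prop := ∀ (n : Int), Dom_dynamics n → Pre_dynamics n → Spec_dynamics n (dynamics n)

-- ===== LEMMAS AND PROOFS =====

-- number of integers in [1,x] divisible by 2, 3 or 5 (inclusion–exclusion), for 0 ≤ x
def cnt (x : Int) : Int :=
  x / 2 + x / 3 + x / 5 - x / 6 - x / 10 - x / 15 + x / 30

-- one-divisor step facts (omega on a single divisor is cheap; all 14 at once is not)
lemma step2 (x : Int) : x / 2 = (x-1)/2 + (if x % 2 = 0 then 1 else 0) := by split_ifs <;> omega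
lemma step3 (x : Int) : x / 3 = (x-1)/3 + (if x % 3 = 0 then 1 else 0) := by split_ifs <;> omega
lemma step5 (x : Int) : x / 5 = (x-1)/5 + (if x % 5 = 0 then 1 else 0) := by split_ifs <;> omega
lemma step6 (x : Int) : x / 6 = (x-1)/6 + (if x % 6 = 0 then 1 else 0) := by split_ifs <;> omega
lemma step10 (x : Int) : x / 10 = (x-1)/10 + (if x % 10 = 0 then 1 else 0) := by split_ifs <;> omega
lemma step15 (x : Int) : x / 15 = (x-1)/15 + (if x % 15 = 0 then 1 else 0) := by split_ifs <;> omega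
lemma step30 (x : Int) : x / 30 = (x-1)/30 + (if x % 30 = 0 then 1 else 0) := by split_ifs <;> omega
lemma m6 (x : Int) : x % 6 = 0 ↔ (x % 2 = 0 ∧ x % 3 = 0) := by omega
lemma m10 (x : Int) : x % 10 = 0 ↔ (x % 2 = 0 ∧ x % 5 = 0) := by omega
lemma m15 (x : Int) : x % 15 = 0 ↔ (x % 3 = 0 ∧ x % 5 = 0) := by omega
lemma m30 (x : Int) : x % 30 = 0 ↔ (x % 2 = 0 ∧ x % 3 = 0 ∧ x % 5 = 0) := by omega

lemma cnt_succ (x : Int) :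
    cnt x = cnt (x - 1) + (if x % 2 = 0 ∨ x % 3 = 0 ∨ x % 5 = 0 then 1 else 0) := by
  unfold cnt
  rw [step2 x, step3 x, step5 x, step6 x, step10 x, step15 x, step30 x]
  simp only [m6, m10, m15, m30]
  by_cases h2 : x % 2 = 0 <;> by_cases h3 : x % 3 = 0 <;> by_cases h5 : x % 5 = 0 <;>
    simp [h2, h3, h5] <;> ring

lemma cnt_mono (a b : Int) (h : a ≤ b) : cnt a ≤ cnt b := by
  induction b, h using Int.le_induction with
  | base => exact le_refl _
  | succ b _ ih =>
      have hstep : cnt b ≤ cnt (b + 1) := by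
        rw [cnt_succ (b + 1)]
        simp only [add_sub_cancel_right]
        split_ifs <;> omega
      omega

lemma table_prop (r : Int) (h0 : 0 ≤ r) (h1 : r < 22) :
    2 ≤ (PySem.List.pyGet? pvTableB r).getD 0 ∧
    (PySem.List.pyGet? pvTableB r).getD 0 ≤ 30 ∧
    ((PySem.List.pyGet? pvTableB r).getD 0 % 2 = 0 ∨
     (PySem.List.pyGet? pvTableB r).getD 0 % 3 = 0 ∨
     (PySem.List.pyGet? pvTableB r).getD 0 % 5 = 0) ∧
    cnt ((PySem.List.pyGet? pvTableB r).getD 0) = r + 1 := by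
  interval_cases r <;> decide

lemma shift2 (q t : Int) : (30 * q + t) / 2 = 15 * q + t / 2 := by omega
lemma shift3 (q t : Int) : (30 * q + t) / 3 = 10 * q + t / 3 := by omega
lemma shift5 (q t : Int) : (30 * q + t) / 5 = 6 * q + t / 5 := by omega
lemma shift6 (q t : Int) : (30 * q + t) / 6 = 5 * q + t / 6 := by omega
lemma shift10 (q t : Int) : (30 * q + t) / 10 = 3 * q + t / 10 := by omega
lemma shift15 (q t : Int) : (30 * q + t) / 15 = 2 * q + t / 15 := by omega
lemma shift30 (q t : Int) : (30 * q + t) / 30 = q + t / 30 := by omega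

lemma cnt_shift (q t : Int) : cnt (30 * q + t) = 22 * q + cnt t := by
  unfold cnt
  rw [shift2, shift3, shift5, shift6, shift10, shift15, shift30]
  ring

-- main loop lemma: from any loop-top state consistent with A's invariant, the
-- loop returns the target value A (the unique multiple with cnt A = n - 1).
lemma dynLoop_eq (n A : Int)
    (hA2 : 2 ≤ A)
    (hdiv : A % 2 = 0 ∨ A % 3 = 0 ∨ A % 5 = 0)
    (hcnt : cnt A = n - 1) :
    ∀ (fuel : Nat) (num : Int), 2 ≤ num → num ≤ A →
      (A - num).toNat < fuel →
      dynLoop n (cnt (num - 1) + 1) num fuel = A := by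
  intro fuel
  induction fuel with
  | zero => intro num _ _ hf; omega
  | succ fuel ih =>
      intro num h2 hle hf
      have hcs := cnt_succ num
      unfold dynLoop
      rcases eq_or_lt_of_le hle with heq | hlt
      · -- num = A : A's counter reaches n and the loop returns num
        subst heq
        have hret : cnt (num - 1) + 1 + 1 = n := by
          rw [if_pos hdiv] at hcs; omega
        simp only [if_pos hdiv, if_pos hret]
      · -- num < A : the counter is still below n, the loop advances
        have hAm1 : cnt (A - 1) = n - 2 := by
          have hA := cnt_succ A; rw [if_pos hdiv] at hA; omega
        have hmono : cnt num ≤ n - 2 := by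
          have := cnt_mono num (A - 1) (by omega); omega
        by_cases hd : num % 2 = 0 ∨ num % 3 = 0 ∨ num % 5 = 0
        · rw [if_pos hd] at hcs
          have hni : ¬(cnt (num - 1) + 1 + 1 = n) := by omega
          simp only [if_pos hd, if_neg hni]
          have hrw : cnt (num - 1) + 1 + 1 = cnt (num + 1 - 1) + 1 := by
            simp only [add_sub_cancel_right]; omega
          rw [hrw]
          exact ih (num + 1) (by omega) (by omega) (by omega)
        · rw [if_neg hd] at hcs
          have hni : ¬(cnt (num - 1) + 1 = n) := by omega
          simp only [if_neg hd, if_neg hni]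
          have hrw : cnt (num - 1) + 1 = cnt (num + 1 - 1) + 1 := by
            simp only [add_sub_cancel_right]; omega
          rw [hrw]
          exact ih (num + 1) (by omega) (by omega) (by omega)

-- ===== VERDICT (by name: the statement is the Claim_ definition above) =====
theorem dynamics_spec : Claim_equal_dynamics := by
  intro n _ hpre
  unfold Spec_dynamics
  have hn : 2 ≤ n := hpre
  unfold dynamics_alt
  rw [PySem.Int.floordiv_eq_ediv_of_pos (by norm_num), PySem.Int.mod_eq_emod_of_pos (by norm_num)]
  set q := (n - 2) / 22 with hq
  set r := (n - 2) % 22 with hr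
  have hr0 : 0 ≤ r := Int.emod_nonneg _ (by norm_num)
  have hr1 : r < 22 := Int.emod_lt_of_pos _ (by norm_num)
  have hq0 : 0 ≤ q := Int.ediv_nonneg (by omega) (by norm_num)
  have hqr : 22 * q + r = n - 2 := by omega
  obtain ⟨ht2, ht30, htdiv, htcnt⟩ := table_prop r hr0 hr1
  set t := (PySem.List.pyGet? pvTableB r).getD 0 with htdef
  have hA2 : 2 ≤ 30 * q + t := by omega
  have hAdiv : (30 * q + t) % 2 = 0 ∨ (30 * q + t) % 3 = 0 ∨ (30 * q + t) % 5 = 0 := by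
    rcases htdiv with h | h | h
    · left; omega
    · right; left; omega
    · right; right; omega
  have hAcnt : cnt (30 * q + t) = n - 1 := by
    rw [cnt_shift]; omega
  have hfuel : (30 * q + t - 2).toNat < (30 * n).toNat := by
    have hqb : q ≤ n - 2 := by omega
    omega
  have hcnt1 : (1 : Int) = cnt (2 - 1) + 1 := by decide
  show dynLoop n 1 2 (30 * n).toNat = 30 * q + t
  rw [hcnt1]
  exact dynLoop_eq n (30 * q + t) hA2 hAdiv hAcnt ((30 * n).toNat) 2 (by omega) hA2 hfuel
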